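-- pv_equiv track=rewrite | github.com/solown/python-TD1 | ex10/main.py | listAdding
-- ===== SOURCE A (Python) =====
-- class UnvalidListException(Exception):
--     """Exception to throw an error when the list contains items out of [0:]"""
--
-- def validateList(myList):
--     """Valide la liste celon l'énnoncé
--         :param myList: Liste entrée
--         :type myList: Liste
--         :raises TooMuchArgs: Trop d'argument en entrée
--         :raises IOError:Erreur fichier INPUT pas trouvé
--         :raises IndexError: Erreur fichier INPUT demandé dans l'appel
--         :return: Soit un true soit un False
--         :rtype: bool
--     """
--     for item in myList:
--         if item < 0 or item > 6:
--             return False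
--     return True
--
-- def listAdding(myList):
--     """Permet d'ajouter ou des éléments dans une liste
--         :param myList: Liste entré
--         :type myList:Liste
--         :return: Retourne la liste après traitement
--         :rtype: Liste
--         :raises UnvalidListException: La liste n'est pas valide
--     """
--     myList = list(map(int, myList))
--     if validateList(myList) is False:
--         raise UnvalidListException
--     for idx, item in enumerate(myList):
--         if item >= 2:
--             myList[idx] = item + 3
--     return myList
-- ===== SOURCE B (Python) =====
-- class UnvalidListException(Exception):
--     """Exception to throw an error when the list contains items out of [0:]"""
--
-- def listAdding(myList):
--     myList = list(map(int, myList))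
--     out = []
--     for item in myList:
--         if not 0 <= item <= 6:
--             raise UnvalidListException
--         out.append(item + 3 if item >= 2 else item)
--     return out
-- ===== Notes on version B (the rewrite author's own statement) =====
-- stated objective: simpler
-- what changed: Replaces the separate validate-helper pass plus in-place enumerate mutation with one fused loop that validates each item and appends the transformed value to a new list.
import Mathlib
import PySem

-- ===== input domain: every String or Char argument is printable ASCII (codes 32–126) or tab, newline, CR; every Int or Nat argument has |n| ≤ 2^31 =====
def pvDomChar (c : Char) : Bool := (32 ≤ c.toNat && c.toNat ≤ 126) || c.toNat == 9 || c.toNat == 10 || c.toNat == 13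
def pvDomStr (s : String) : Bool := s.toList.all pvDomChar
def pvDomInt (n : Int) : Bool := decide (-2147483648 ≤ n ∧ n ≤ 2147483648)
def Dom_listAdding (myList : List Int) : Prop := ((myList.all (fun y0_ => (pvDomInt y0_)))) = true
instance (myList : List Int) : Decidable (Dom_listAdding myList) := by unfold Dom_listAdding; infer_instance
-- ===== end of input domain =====

-- B fuses A's validate-helper pass and in-place mutation pass into one loop building a new list (simpler, same cost).

-- ===== PORT A =====
def validateList (myList : List Int) : Bool :=
  -- for item in myList: if item < 0 or item > 6: return False; return True
  match myList with
  | [] => true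
  | item :: rest => if item < 0 ∨ item > 6 then false else validateList rest

def listAdding (myList : List Int) : List Int :=
  if validateList myList = false then
    []  -- raise UnvalidListException : unreachable under Pre_listAdding
  else
    (PySem.List.enumerate myList).foldl
      (fun acc p => if p.2 ≥ 2 then acc.set p.1.toNat (p.2 + 3) else acc) myList

-- ===== PORT B =====
def listAddingAltLoop (myList : List Int) : List Int :=
  match myList with
  | [] => []
  | item :: rest =>
    if ¬ (0 ≤ item ∧ item ≤ 6) then
      []  -- raise UnvalidListException : unreachable under Pre_listAdding
    else (if item ≥ 2 then item + 3 else item) :: listAddingAltLoop rest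

def listAdding_alt (myList : List Int) : List Int := listAddingAltLoop myList

-- ===== PRECONDITION & SPEC =====
-- Pre_ excludes exactly the lists containing a negative item or an item greater than six, on which A raises UnvalidListException.
def Pre_listAdding (myList : List Int) : Prop := ∀ x ∈ myList, 0 ≤ x ∧ x ≤ 6
instance (myList : List Int) : Decidable (Pre_listAdding myList) := by unfold Pre_listAdding; infer_instance
def pvWitness_listAdding : List Int := [0, 1, 2, 5, 6]

def Spec_listAdding (myList : List Int) (out : List Int) : Prop := out = listAdding_alt myList
instance (myList : List Int) (out : List Int) : Decidable (Spec_listAdding myList out) := by unfold Spec_listAdding; infer_instance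

-- ===== CLAIM (what is proved, stated in full; the proofs are below) =====
def Claim_equal_listAdding : Prop := ∀ (myList : List Int), Dom_listAdding myList → Pre_listAdding myList → Spec_listAdding myList (listAdding myList)

-- ===== LEMMAS AND PROOFS =====
theorem validateList_of_pre (myList : List Int) (h : Pre_listAdding myList) :
    validateList myList = true := by
  induction myList with
  | nil => rfl
  | cons x xs ih =>
    have hx := h x (by simp)
    simp only [validateList]
    rw [if_neg (by omega)]
    exact ih (fun y hy => h y (by simp [hy]))

-- invariant of A's mutate loop: folding the enumerate of xs (from start ys.length)
-- over the accumulator ys ++ xs yields ys ++ map f xs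
theorem foldl_enum_set (xs ys : List Int) :
    (PySem.List.enumerate xs (ys.length : Int)).foldl
      (fun acc p => if p.2 ≥ 2 then acc.set p.1.toNat (p.2 + 3) else acc) (ys ++ xs)
    = ys ++ xs.map (fun x => if x ≥ 2 then x + 3 else x) := by
  induction xs generalizing ys with
  | nil => simp
  | cons x xs ih =>
    rw [PySem.List.enumerate_cons, List.foldl_cons]
    by_cases hx : x ≥ 2
    · have hset : (ys ++ x :: xs).set (((ys.length : Int)).toNat) (x + 3)
          = (ys ++ [x + 3]) ++ xs := by
        simp [List.append_assoc]
      rw [if_pos hx, hset]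
      have hlen : ((ys.length : Int) + 1) = (((ys ++ [x + 3]).length : Int)) := by
        simp
      rw [hlen, ih (ys ++ [x + 3])]
      simp [hx]
    · rw [if_neg hx]
      have : (x :: xs) = [x] ++ xs := rfl
      rw [this, ← List.append_assoc]
      have hlen : ((ys.length : Int) + 1) = (((ys ++ [x]).length : Int)) := by simp
      rw [hlen, ih (ys ++ [x])]
      simp [hx]

theorem altLoop_eq_map (xs : List Int) (h : ∀ x ∈ xs, 0 ≤ x ∧ x ≤ 6) :
    listAddingAltLoop xs = xs.map (fun x => if x ≥ 2 then x + 3 else x) := by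
  induction xs with
  | nil => rfl
  | cons x xs ih =>
    have hx := h x (by simp)
    simp only [listAddingAltLoop, List.map_cons]
    rw [if_neg (by omega), ih (fun y hy => h y (by simp [hy]))]

-- ===== VERDICT (by name: the statement is the Claim_ definition above) =====
theorem listAdding_spec : Claim_equal_listAdding := by
  intro myList _ hpre
  unfold Spec_listAdding listAdding listAdding_alt
  rw [validateList_of_pre myList hpre]
  simp only [Bool.true_eq_false, if_false]
  have := foldl_enum_set myList []
  simp only [List.length_nil, Int.natCast_zero, List.nil_append] at this
  rw [this, altLoop_eq_map myList hpre]
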